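-- pv_equiv track=rewrite | github.com/nursutopsakal-debug/K-s-ttan-mayanlar | src/scoring.py | _calculate_happiness
-- ===== SOURCE A (Python) =====
-- def _calculate_happiness(player_layout, guests_dict):
--     happiness = 0
--
--     for guests in player_layout.values():
--         for guest_name in guests:
--             guest = guests_dict.get(guest_name)
--             if not guest:
--                 continue
--
--             liked_people = guest.get("likes", [])
--             must_people = guest.get("must_sit_with", [])
--
--             for other_name in guests:
--                 if other_name == guest_name:
--                     continue
--                 if other_name in liked_people:
--                     happiness += 10
--                 if other_name in must_people:
--                     happiness += 15
--
--     return happiness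
-- ===== SOURCE B (Python) =====
-- def _calculate_happiness(player_layout, guests_dict):
--     happiness = 0
--     for guests in player_layout.values():
--         count = {}
--         for g in guests:
--             count[g] = count.get(g, 0) + 1
--         for guest_name, n in count.items():
--             guest = guests_dict.get(guest_name)
--             if not guest:
--                 continue
--             liked = set(guest.get("likes", []))
--             must = set(guest.get("must_sit_with", []))
--             contrib = 0
--             for name, m in count.items():
--                 if name == guest_name:
--                     continue
--                 if name in liked:
--                     contrib += 10 * m
--                 if name in must:
--                     contrib += 15 * m
--             happiness += n * contrib
--     return happiness
-- ===== Notes on version B (the rewrite author's own statement) =====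
-- stated objective: alternative
-- what changed: B builds a per-table dict counting each name's occurrences and iterates over the distinct (name, count) pairs, weighting each pairwise like/must-sit contribution by the two multiplicities and checking preference membership against sets, instead of A's quadratic loop over all occurrence pairs.
import Mathlib
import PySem

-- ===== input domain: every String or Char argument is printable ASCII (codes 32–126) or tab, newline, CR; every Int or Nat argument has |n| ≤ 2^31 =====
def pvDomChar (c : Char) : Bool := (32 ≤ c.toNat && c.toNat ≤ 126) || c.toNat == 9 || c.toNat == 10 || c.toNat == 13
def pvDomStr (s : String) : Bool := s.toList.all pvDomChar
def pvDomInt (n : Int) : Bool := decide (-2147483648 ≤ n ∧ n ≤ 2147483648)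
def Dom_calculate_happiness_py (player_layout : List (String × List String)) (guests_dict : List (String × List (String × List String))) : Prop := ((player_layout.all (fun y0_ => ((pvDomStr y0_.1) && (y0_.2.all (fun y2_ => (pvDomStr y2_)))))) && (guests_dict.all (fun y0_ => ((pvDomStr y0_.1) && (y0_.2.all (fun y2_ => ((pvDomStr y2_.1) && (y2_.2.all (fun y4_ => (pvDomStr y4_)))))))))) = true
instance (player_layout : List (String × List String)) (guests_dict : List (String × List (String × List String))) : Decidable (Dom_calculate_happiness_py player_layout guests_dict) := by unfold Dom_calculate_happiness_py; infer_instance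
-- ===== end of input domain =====

-- B counts each table's guests once into a dict and sums over distinct (name, count) pairs weighted by multiplicities, instead of A's loop over all occurrence pairs; equal return values (alternative algorithm).

-- ===== PORT A =====
def calculate_happiness_py (player_layout : List (String × List String)) (guests_dict : List (String × List (String × List String))) : Int :=
  player_layout.foldl (fun happiness tbl =>
    tbl.2.foldl (fun happiness guest_name =>
      match PySem.Dict.get? (PySem.Dict.mk guests_dict) guest_name with
      | none => happiness
      | some guest =>
        if guest = [] then happiness
        else
          let liked_people := PySem.Dict.getD (PySem.Dict.mk guest) "likes" []
          let must_people := PySem.Dict.getD (PySem.Dict.mk guest) "must_sit_with" []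
          tbl.2.foldl (fun happiness other_name =>
            if other_name = guest_name then happiness
            else
              let h1 := if liked_people.contains other_name then happiness + 10 else happiness
              if must_people.contains other_name then h1 + 15 else h1) happiness) happiness) 0

-- ===== PORT B =====
def calculate_happiness_py_alt (player_layout : List (String × List String)) (guests_dict : List (String × List (String × List String))) : Int :=
  player_layout.foldl (fun happiness tbl =>
    let count := tbl.2.foldl (fun d g => d.insert g (d.getD g 0 + 1)) (PySem.Dict.empty : PySem.Dict String Int)
    count.items.foldl (fun happiness p =>
      match PySem.Dict.get? (PySem.Dict.mk guests_dict) p.1 with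
      | none => happiness
      | some guest =>
        if guest = [] then happiness
        else
          let liked := PySem.Set.ofList (PySem.Dict.getD (PySem.Dict.mk guest) "likes" [])
          let must := PySem.Set.ofList (PySem.Dict.getD (PySem.Dict.mk guest) "must_sit_with" [])
          let contrib := count.items.foldl (fun c q =>
            if q.1 = p.1 then c
            else
              let c1 := if PySem.Set.contains liked q.1 then c + 10 * q.2 else c
              if PySem.Set.contains must q.1 then c1 + 15 * q.2 else c1) 0
          happiness + p.2 * contrib) happiness) 0

-- ===== PRECONDITION & SPEC =====
def Spec_calculate_happiness_py (player_layout : List (String × List String)) (guests_dict : List (String × List (String × List String))) (out : Int) : Prop := out = calculate_happiness_py_alt player_layout guests_dict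
instance (player_layout : List (String × List String)) (guests_dict : List (String × List (String × List String))) (out : Int) : Decidable (Spec_calculate_happiness_py player_layout guests_dict out) := by unfold Spec_calculate_happiness_py; infer_instance

-- ===== CLAIM (what is proved, stated in full; the proofs are below) =====
def Claim_equal_calculate_happiness_py : Prop := ∀ (player_layout : List (String × List String)) (guests_dict : List (String × List (String × List String))), Dom_calculate_happiness_py player_layout guests_dict → Spec_calculate_happiness_py player_layout guests_dict (calculate_happiness_py player_layout guests_dict)

-- ===== LEMMAS AND PROOFS =====

-- per-occurrence weight that one seated `other` contributes to `gname`'s happiness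
def pvW (liked must : List String) (gname other : String) : Int :=
  if other = gname then 0
  else (if other ∈ liked then 10 else 0) + (if other ∈ must then 15 else 0)

-- total contribution of one occurrence of `name` at a table seating `guests`
def pvF (guests_dict : List (String × List (String × List String))) (guests : List String) (name : String) : Int :=
  match PySem.Dict.get? (PySem.Dict.mk guests_dict) name with
  | none => 0
  | some guest =>
    if guest = [] then 0
    else (guests.map (pvW (PySem.Dict.getD (PySem.Dict.mk guest) "likes" [])
                          (PySem.Dict.getD (PySem.Dict.mk guest) "must_sit_with" []) name)).sum

-- counting lemma: a sum over occurrences is the sum over distinct elements weighted by count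
theorem pv_sum_count_mul (l : List String) (f : String → Int) :
    ((PySem.Set.ofList l).map (fun k => (l.count k : Int) * f k)).sum = (l.map f).sum := by
  rw [← List.sum_toFinset _ (PySem.Set.nodup_ofList l)]
  have h : (PySem.Set.ofList l : List String).toFinset = l.toFinset := by
    ext x; simp [PySem.Set.mem_ofList]
  rw [h, Finset.sum_list_map_count]
  refine Finset.sum_congr rfl fun m _ => ?_
  simp

-- A's inner loop adds pvW per co-seated occurrence
theorem pvA_inner (guests liked must : List String) (gname : String) (h : Int) :
    guests.foldl (fun happiness other_name =>
      if other_name = gname then happiness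
      else
        let h1 := if liked.contains other_name then happiness + 10 else happiness
        if must.contains other_name then h1 + 15 else h1) h
    = h + (guests.map (pvW liked must gname)).sum := by
  rw [PySem.List.foldl_congr_mem _ _ (fun acc o => acc + pvW liked must gname o) _ ?_]
  · exact PySem.List.foldl_add guests (pvW liked must gname) h
  · intro acc o _
    simp only [pvW]
    by_cases h1 : o = gname
    · simp [h1]
    · by_cases h2 : o ∈ liked <;> by_cases h3 : o ∈ must <;>
        simp [h1, h2, h3]
      ring

-- A's per-table loop
theorem pvA_table (guests_dict : List (String × List (String × List String))) (guests : List String) (h : Int) :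
    guests.foldl (fun happiness guest_name =>
      match PySem.Dict.get? (PySem.Dict.mk guests_dict) guest_name with
      | none => happiness
      | some guest =>
        if guest = [] then happiness
        else
          let liked_people := PySem.Dict.getD (PySem.Dict.mk guest) "likes" []
          let must_people := PySem.Dict.getD (PySem.Dict.mk guest) "must_sit_with" []
          guests.foldl (fun happiness other_name =>
            if other_name = guest_name then happiness
            else
              let h1 := if liked_people.contains other_name then happiness + 10 else happiness
              if must_people.contains other_name then h1 + 15 else h1) happiness) h
    = h + (guests.map (pvF guests_dict guests)).sum := by
  rw [PySem.List.foldl_congr_mem _ _ (fun acc name => acc + pvF guests_dict guests name) _ ?_]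
  · exact PySem.List.foldl_add guests (pvF guests_dict guests) h
  · intro acc name _
    simp only [pvF]
    cases PySem.Dict.get? (PySem.Dict.mk guests_dict) name with
    | none => simp
    | some guest =>
      by_cases hg : guest = []
      · simp [hg]
      · simp only [hg, if_false]
        exact pvA_inner guests _ _ name acc

-- B's inner loop over (name, count) pairs computes pvF for a valid guest
theorem pvB_inner (guests liked must : List String) (gname : String) :
    ((PySem.Set.ofList guests : List String).map (fun k => (k, (guests.count k : Int)))).foldl
      (fun c q =>
        if q.1 = gname then c
        else
          let c1 := if PySem.Set.contains (PySem.Set.ofList liked) q.1 then c + 10 * q.2 else c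
          if PySem.Set.contains (PySem.Set.ofList must) q.1 then c1 + 15 * q.2 else c1) 0
    = (guests.map (pvW liked must gname)).sum := by
  rw [List.foldl_map]
  rw [PySem.List.foldl_congr_mem _ _
      (fun acc k => acc + (guests.count k : Int) * pvW liked must gname k) _ ?_]
  · rw [PySem.List.foldl_add, pv_sum_count_mul]
    simp
  · intro acc k _
    simp only [pvW]
    by_cases h1 : k = gname
    · simp [h1]
    · by_cases h2 : k ∈ liked <;> by_cases h3 : k ∈ must <;>
        simp [h1, h2, h3, PySem.Set.mem_ofList] <;> ring

-- B's per-table loop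
theorem pvB_table (guests_dict : List (String × List (String × List String))) (guests : List String) (h : Int) :
    (let count := guests.foldl (fun d g => d.insert g (d.getD g 0 + 1)) (PySem.Dict.empty : PySem.Dict String Int)
     count.items.foldl (fun happiness p =>
      match PySem.Dict.get? (PySem.Dict.mk guests_dict) p.1 with
      | none => happiness
      | some guest =>
        if guest = [] then happiness
        else
          let liked := PySem.Set.ofList (PySem.Dict.getD (PySem.Dict.mk guest) "likes" [])
          let must := PySem.Set.ofList (PySem.Dict.getD (PySem.Dict.mk guest) "must_sit_with" [])
          let contrib := count.items.foldl (fun c q =>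
            if q.1 = p.1 then c
            else
              let c1 := if PySem.Set.contains liked q.1 then c + 10 * q.2 else c
              if PySem.Set.contains must q.1 then c1 + 15 * q.2 else c1) 0
          happiness + p.2 * contrib) h)
    = h + (guests.map (pvF guests_dict guests)).sum := by
  simp only [PySem.Dict.foldl_insert_getD_add_one_eq_counter, PySem.Dict.items_counter]
  rw [List.foldl_map]
  rw [PySem.List.foldl_congr_mem _ _
      (fun acc k => acc + (guests.count k : Int) * pvF guests_dict guests k) _ ?_]
  · rw [PySem.List.foldl_add, pv_sum_count_mul]
  · intro acc k _
    simp only [pvF]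
    cases PySem.Dict.get? (PySem.Dict.mk guests_dict) k with
    | none => simp
    | some guest =>
      by_cases hg : guest = []
      · simp [hg]
      · simp only [hg, if_false]
        rw [pvB_inner guests _ _ k]

-- ===== VERDICT (by name: the statement is the Claim_ definition above) =====
theorem calculate_happiness_py_spec : Claim_equal_calculate_happiness_py := by
  intro player_layout guests_dict _
  unfold Spec_calculate_happiness_py calculate_happiness_py calculate_happiness_py_alt
  rw [PySem.List.foldl_congr_mem _ _
      (fun h tbl => h + (tbl.2.map (pvF guests_dict tbl.2)).sum) _
      (fun acc tbl _ => pvA_table guests_dict tbl.2 acc)]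
  exact (PySem.List.foldl_congr_mem player_layout _
      (fun (h : Int) (tbl : String × List String) => h + (tbl.2.map (pvF guests_dict tbl.2)).sum) 0
      (fun acc tbl _ => pvB_table guests_dict tbl.2 acc)).symm
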